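-- pv_equiv track=rewrite | github.com/maotoumao/facet-extraction-module | preprocess/getTopicHieraries.py | findMaxMatchTopic
-- ===== SOURCE A (Python) =====
-- def findMaxMatchTopic(sentence, topicList):
--     index = -1
--     currIndex = 0
--     topic_length = 0
--     for t in topicList:
--         if (sentence.find(t) != -1):
--             if (len(t) > topic_length):
--                 index = currIndex
--                 topic_length = len(t)
--         currIndex += 1
--     return index
-- ===== SOURCE B (Python) =====
-- def findMaxMatchTopic(sentence, topicList):
--     lens = [len(t) for t in topicList if t in sentence]
--     best = max(lens) if lens else 0
--     if best == 0:
--         return -1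
--     for i, t in enumerate(topicList):
--         if len(t) == best and t in sentence:
--             return i
--     return -1
-- ===== Notes on version B (the rewrite author's own statement) =====
-- stated objective: alternative
-- what changed: Replaces A's single-pass running-argmax (tracking best index and best length in one fold) by a two-phase computation: first compute the maximum length of any topic contained in the sentence, then return the index of the first topic attaining that length; returns -1 when the maximum is 0.
import Mathlib
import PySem

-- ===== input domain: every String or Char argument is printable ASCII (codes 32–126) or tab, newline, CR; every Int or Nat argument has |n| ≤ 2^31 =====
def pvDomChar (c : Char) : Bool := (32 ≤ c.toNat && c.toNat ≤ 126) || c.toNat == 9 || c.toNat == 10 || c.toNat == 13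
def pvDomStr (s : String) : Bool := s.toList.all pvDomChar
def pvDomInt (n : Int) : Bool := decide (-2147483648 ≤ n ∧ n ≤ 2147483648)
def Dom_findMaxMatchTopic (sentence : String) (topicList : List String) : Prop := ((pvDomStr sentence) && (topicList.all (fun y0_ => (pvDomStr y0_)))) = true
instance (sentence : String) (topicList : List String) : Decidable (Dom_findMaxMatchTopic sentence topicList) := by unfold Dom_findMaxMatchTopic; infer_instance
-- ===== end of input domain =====

-- B replaces A's one-pass running argmax by two phases (max matching length, then first index attaining it): an alternative decomposition of the same cost.

-- ===== PORT A =====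
def findMaxMatchTopic (sentence : String) (topicList : List String) : Int :=
  (topicList.foldl
    (fun (st : Int × Int × Int) t =>
      let index := st.1
      let currIndex := st.2.1
      let topicLength := st.2.2
      if PySem.Str.find sentence t ≠ -1 then
        if PySem.Str.len t > topicLength then
          (currIndex, currIndex + 1, PySem.Str.len t)
        else (index, currIndex + 1, topicLength)
      else (index, currIndex + 1, topicLength))
    (-1, 0, 0)).1

-- ===== PORT B =====
def findMaxMatchTopic_alt (sentence : String) (topicList : List String) : Int :=
  let lens := (topicList.filter (fun t => PySem.Str.isIn t sentence)).map (fun t => PySem.Str.len t)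
  let best := match PySem.List.max? lens (fun x => x) with
    | some m => m
    | none => 0
  if best == 0 then -1
  else
    match (PySem.List.enumerate topicList).find?
        (fun p => PySem.Str.len p.2 == best && PySem.Str.isIn p.2 sentence) with
    | some p => p.1
    | none => -1

-- ===== PRECONDITION & SPEC =====
def Spec_findMaxMatchTopic (sentence : String) (topicList : List String) (out : Int) : Prop := out = findMaxMatchTopic_alt sentence topicList
instance (sentence : String) (topicList : List String) (out : Int) : Decidable (Spec_findMaxMatchTopic sentence topicList out) := by unfold Spec_findMaxMatchTopic; infer_instance

-- ===== CLAIM (what is proved, stated in full; the proofs are below) =====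
def Claim_equal_findMaxMatchTopic : Prop := ∀ (sentence : String) (topicList : List String), Dom_findMaxMatchTopic sentence topicList → Spec_findMaxMatchTopic sentence topicList (findMaxMatchTopic sentence topicList)

-- ===== LEMMAS AND PROOFS =====

def pvBest (sentence : String) (ts : List String) (a : Int) : Int :=
  ts.foldl (fun acc t => if PySem.Str.isIn t sentence then max acc (PySem.Str.len t) else acc) a

theorem pvBest_cons (sentence t : String) (ts : List String) (a : Int) :
    pvBest sentence (t :: ts) a
      = pvBest sentence ts (if PySem.Str.isIn t sentence then max a (PySem.Str.len t) else a) := rfl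

theorem le_pvBest (sentence : String) (ts : List String) (a : Int) : a ≤ pvBest sentence ts a := by
  induction ts generalizing a with
  | nil => simp [pvBest]
  | cons t ts ih =>
    rw [pvBest_cons]
    refine le_trans ?_ (ih _)
    split <;> simp

theorem pvBest_attained (sentence : String) (ts : List String) (a : Int)
    (h : pvBest sentence ts a > a) :
    ∃ t ∈ ts, PySem.Str.isIn t sentence = true ∧ PySem.Str.len t = pvBest sentence ts a := by
  induction ts generalizing a with
  | nil => simp [pvBest] at h
  | cons t ts ih =>
    rw [pvBest_cons] at h ⊢
    by_cases hP : PySem.Str.isIn t sentence = true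
    · rw [if_pos hP] at h ⊢
      by_cases hGt : pvBest sentence ts (max a (PySem.Str.len t)) > max a (PySem.Str.len t)
      · rcases ih _ hGt with ⟨u, hu, hPu, hlu⟩
        exact ⟨u, List.mem_cons_of_mem _ hu, hPu, hlu⟩
      · have hle := le_pvBest sentence ts (max a (PySem.Str.len t))
        have heq : pvBest sentence ts (max a (PySem.Str.len t)) = max a (PySem.Str.len t) := by omega
        refine ⟨t, List.mem_cons_self, hP, ?_⟩
        rw [heq]; omega
    · rw [if_neg hP] at h ⊢
      rcases ih _ h with ⟨u, hu, hPu, hlu⟩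
      exact ⟨u, List.mem_cons_of_mem _ hu, hPu, hlu⟩

theorem find?_enumerate_isSome (g : String → Bool) (ts : List String) (s : Int)
    (h : ∃ t ∈ ts, g t = true) :
    ∃ p, (PySem.List.enumerate ts s).find? (fun p => g p.2) = some p := by
  induction ts generalizing s with
  | nil => simp at h
  | cons t ts ih =>
    rw [PySem.List.enumerate_cons]
    by_cases hg : g t = true
    · exact ⟨(s, t), List.find?_cons_of_pos hg⟩
    · rcases h with ⟨u, hu, hgu⟩
      rcases List.mem_cons.mp hu with rfl | hu'
      · exact absurd hgu hg
      · rcases ih (s + 1) ⟨u, hu', hgu⟩ with ⟨p, hp⟩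
        exact ⟨p, by rw [List.find?_cons_of_neg (by simpa using hg), hp]⟩

theorem pvFind_iff (sentence t : String) :
    (PySem.Str.find sentence t ≠ -1) ↔ (PySem.Str.isIn t sentence = true) := by
  rw [PySem.Str.find_ne_neg_one_iff, PySem.Str.isIn_iff_infix]

def pvStep (sentence : String) (st : Int × Int × Int) (t : String) : Int × Int × Int :=
  let index := st.1
  let currIndex := st.2.1
  let topicLength := st.2.2
  if PySem.Str.find sentence t ≠ -1 then
    if PySem.Str.len t > topicLength then
      (currIndex, currIndex + 1, PySem.Str.len t)
    else (index, currIndex + 1, topicLength)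
  else (index, currIndex + 1, topicLength)

theorem pvStep_pos_gt (sentence t : String) (bi c bl : Int)
    (hF : PySem.Str.find sentence t ≠ -1) (hL : PySem.Str.len t > bl) :
    pvStep sentence (bi, c, bl) t = (c, c + 1, PySem.Str.len t) := by
  simp only [pvStep]
  rw [if_pos hF, if_pos hL]

theorem pvStep_pos_le (sentence t : String) (bi c bl : Int)
    (hF : PySem.Str.find sentence t ≠ -1) (hL : ¬ PySem.Str.len t > bl) :
    pvStep sentence (bi, c, bl) t = (bi, c + 1, bl) := by
  simp only [pvStep]
  rw [if_pos hF, if_neg hL]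

theorem pvStep_neg (sentence t : String) (bi c bl : Int)
    (hF : ¬ PySem.Str.find sentence t ≠ -1) :
    pvStep sentence (bi, c, bl) t = (bi, c + 1, bl) := by
  simp only [pvStep]
  rw [if_neg hF]

theorem foldA_char (sentence : String) (ts : List String) : ∀ (bi c bl : Int),
    ts.foldl (pvStep sentence) (bi, c, bl)
    = ((if pvBest sentence ts bl > bl
         then match (PySem.List.enumerate ts c).find?
             (fun p => PySem.Str.len p.2 == pvBest sentence ts bl && PySem.Str.isIn p.2 sentence) with
           | some p => p.1
           | none => bi
         else bi),
       c + ts.length, pvBest sentence ts bl) := by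
  induction ts with
  | nil => intro bi c bl; simp [pvBest]
  | cons t ts ih =>
    intro bi c bl
    rw [List.foldl_cons, pvBest_cons, PySem.List.enumerate_cons]
    by_cases hF : PySem.Str.find sentence t ≠ -1
    · have hP : PySem.Str.isIn t sentence = true := (pvFind_iff sentence t).mp hF
      rw [if_pos hP]
      by_cases hL : PySem.Str.len t > bl
      · rw [max_eq_right (le_of_lt hL), pvStep_pos_gt sentence t bi c bl hF hL, ih]
        have hBge := le_pvBest sentence ts (PySem.Str.len t)
        have hCond : pvBest sentence ts (PySem.Str.len t) > bl := by omega
        rw [if_pos hCond]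
        by_cases hGt : pvBest sentence ts (PySem.Str.len t) > PySem.Str.len t
        · rw [if_pos hGt]
          have hhead : (PySem.Str.len t == pvBest sentence ts (PySem.Str.len t)
              && PySem.Str.isIn t sentence) = false := by
            have h1 : (PySem.Str.len t == pvBest sentence ts (PySem.Str.len t)) = false := by
              rw [beq_eq_false_iff_ne]; omega
            rw [h1, Bool.false_and]
          rw [List.find?_cons_of_neg (p := fun p : Int × String => PySem.Str.len p.2 == pvBest sentence ts (PySem.Str.len t) && PySem.Str.isIn p.2 sentence)
              (a := (c, t)) (l := PySem.List.enumerate ts (c + 1)) (Bool.eq_false_iff.mp hhead)]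
          rcases pvBest_attained sentence ts (PySem.Str.len t) hGt with ⟨u, hu, hPu, hlu⟩
          rcases find?_enumerate_isSome
              (fun t' => PySem.Str.len t' == pvBest sentence ts (PySem.Str.len t)
                && PySem.Str.isIn t' sentence) ts (c + 1)
              ⟨u, hu, by show (PySem.Str.len u == pvBest sentence ts (PySem.Str.len t)
                && PySem.Str.isIn u sentence) = true
                         rw [hlu, beq_self_eq_true, Bool.true_and]; exact hPu⟩ with ⟨p, hp⟩
          rw [hp]
          rw [show c + 1 + (ts.length : Int) = c + ((t :: ts).length : Int) by simp only [List.length_cons]; push_cast; omega]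
        · rw [if_neg hGt]
          have hEq : pvBest sentence ts (PySem.Str.len t) = PySem.Str.len t := by omega
          have hhead : (PySem.Str.len t == pvBest sentence ts (PySem.Str.len t)
              && PySem.Str.isIn t sentence) = true := by
            rw [hEq, beq_self_eq_true, Bool.true_and]; exact hP
          rw [List.find?_cons_of_pos (p := fun p : Int × String => PySem.Str.len p.2 == pvBest sentence ts (PySem.Str.len t) && PySem.Str.isIn p.2 sentence)
              (a := (c, t)) (l := PySem.List.enumerate ts (c + 1)) hhead]
          rw [show c + 1 + (ts.length : Int) = c + ((t :: ts).length : Int) by simp only [List.length_cons]; push_cast; omega]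
      · rw [max_eq_left (by omega), pvStep_pos_le sentence t bi c bl hF hL, ih]
        by_cases hC : pvBest sentence ts bl > bl
        · rw [if_pos hC, if_pos hC]
          have hhead : (PySem.Str.len t == pvBest sentence ts bl
              && PySem.Str.isIn t sentence) = false := by
            have h1 : (PySem.Str.len t == pvBest sentence ts bl) = false := by
              rw [beq_eq_false_iff_ne]; omega
            rw [h1, Bool.false_and]
          rw [List.find?_cons_of_neg (p := fun p : Int × String => PySem.Str.len p.2 == pvBest sentence ts bl && PySem.Str.isIn p.2 sentence)
              (a := (c, t)) (l := PySem.List.enumerate ts (c + 1)) (Bool.eq_false_iff.mp hhead)]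
          rw [show c + 1 + (ts.length : Int) = c + ((t :: ts).length : Int) by simp only [List.length_cons]; push_cast; omega]
        · rw [if_neg hC, if_neg hC]
          rw [show c + 1 + (ts.length : Int) = c + ((t :: ts).length : Int) by simp only [List.length_cons]; push_cast; omega]
    · have hP : PySem.Str.isIn t sentence = false :=
        Bool.eq_false_iff.mpr (fun h => hF ((pvFind_iff sentence t).mpr h))
      rw [hP, pvStep_neg sentence t bi c bl hF,
        show (if (false = true) then max bl (PySem.Str.len t) else bl) = bl from rfl, ih]
      by_cases hC : pvBest sentence ts bl > bl
      · rw [if_pos hC, if_pos hC]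
        have hhead : (PySem.Str.len t == pvBest sentence ts bl
            && PySem.Str.isIn t sentence) = false := by rw [hP, Bool.and_false]
        rw [List.find?_cons_of_neg (p := fun p : Int × String => PySem.Str.len p.2 == pvBest sentence ts bl && PySem.Str.isIn p.2 sentence)
            (a := (c, t)) (l := PySem.List.enumerate ts (c + 1)) (Bool.eq_false_iff.mp hhead)]
        rw [show c + 1 + (ts.length : Int) = c + ((t :: ts).length : Int) by simp only [List.length_cons]; push_cast; omega]
      · rw [if_neg hC, if_neg hC]
        rw [show c + 1 + (ts.length : Int) = c + ((t :: ts).length : Int) by simp only [List.length_cons]; push_cast; omega]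

theorem pvBest_eq_foldl (sentence : String) (ts : List String) (a : Int) :
    pvBest sentence ts a
      = ((ts.filter (fun t => PySem.Str.isIn t sentence)).map (fun t => PySem.Str.len t)).foldl max a := by
  induction ts generalizing a with
  | nil => simp [pvBest]
  | cons t ts ih =>
    simp only [pvBest, List.foldl_cons, List.filter_cons] at *
    by_cases h : PySem.Str.isIn t sentence = true
    · rw [if_pos h, if_pos h, List.map_cons, List.foldl_cons, ih]
    · rw [if_neg h, if_neg h, ih]

theorem pvBestB (sentence : String) (ts : List String) :
    (match PySem.List.max? ((ts.filter (fun t => PySem.Str.isIn t sentence)).map (fun t => PySem.Str.len t)) (fun x => x) with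
     | some m => m
     | none => 0) = pvBest sentence ts 0 := by
  rw [pvBest_eq_foldl]
  cases hL : (ts.filter (fun t => PySem.Str.isIn t sentence)).map (fun t => PySem.Str.len t) with
  | nil => rw [show PySem.List.max? ([] : List Int) (fun x => x) = none from rfl]; rfl
  | cons x l =>
    rw [PySem.List.max?_id_cons]
    have hx : 0 ≤ x := by
      have hmem : x ∈ (ts.filter (fun t => PySem.Str.isIn t sentence)).map (fun t => PySem.Str.len t) := by
        rw [hL]; exact List.mem_cons_self
      rcases List.mem_map.mp hmem with ⟨t, _, ht⟩
      rw [← ht]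
      simp [PySem.Str.len_eq]
    rw [List.foldl_cons, max_eq_right hx]

-- ===== VERDICT (by name: the statement is the Claim_ definition above) =====
theorem findMaxMatchTopic_spec : Claim_equal_findMaxMatchTopic := by
  intro sentence topicList _
  unfold Spec_findMaxMatchTopic
  show (List.foldl (pvStep sentence) (-1, 0, 0) topicList).1 = findMaxMatchTopic_alt sentence topicList
  rw [foldA_char]
  simp only [findMaxMatchTopic_alt]
  rw [pvBestB]
  have h0 : (0 : Int) ≤ pvBest sentence topicList 0 := le_pvBest sentence topicList 0
  by_cases hpos : pvBest sentence topicList 0 > 0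
  · rw [if_pos hpos, if_neg (by rw [beq_eq_false_iff_ne.mpr (by omega : pvBest sentence topicList 0 ≠ 0)]; exact Bool.false_ne_true)]
  · rw [if_neg hpos, if_pos (by rw [(by omega : pvBest sentence topicList 0 = 0)]; rfl)]
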